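-- pv_equiv track=rewrite | github.com/lovingfish/cccc-gcli2api | src/credential_manager.py | _is_permanent_refresh_failure
-- ===== SOURCE A (Python) =====
-- def _is_permanent_refresh_failure(error_msg: str) -> bool:
--     """判断是否是凭证永久失效的错误"""
--     # 常见的永久失效错误模式
--     permanent_error_patterns = [
--         "400 Bad Request",
--         "invalid_grant",
--         "refresh_token_expired",
--         "invalid_refresh_token",
--         "unauthorized_client",
--         "access_denied"
--     ]
--
--     error_msg_lower = error_msg.lower()
--     for pattern in permanent_error_patterns:
--         if pattern.lower() in error_msg_lower:
--             return True
--
--     return False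
-- ===== SOURCE B (Python) =====
-- import re
--
-- # One precompiled regex: the alternation of the six (already lowercase) patterns.
-- _PERMANENT_RX = re.compile(
--     "400 bad request|invalid_grant|refresh_token_expired|"
--     "invalid_refresh_token|unauthorized_client|access_denied"
-- )
--
--
-- def _is_permanent_refresh_failure(error_msg: str) -> bool:
--     """判断是否是凭证永久失效的错误"""
--     return bool(_PERMANENT_RX.search(error_msg.lower()))
-- ===== Notes on version B (the rewrite author's own statement) =====
-- stated objective: idiomatic
-- what changed: Replaced the explicit six-pattern loop with per-iteration lowercasing and substring tests by one precompiled regex that is the alternation of the six lowercase patterns, searched once over the lowered message.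
import Mathlib
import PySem

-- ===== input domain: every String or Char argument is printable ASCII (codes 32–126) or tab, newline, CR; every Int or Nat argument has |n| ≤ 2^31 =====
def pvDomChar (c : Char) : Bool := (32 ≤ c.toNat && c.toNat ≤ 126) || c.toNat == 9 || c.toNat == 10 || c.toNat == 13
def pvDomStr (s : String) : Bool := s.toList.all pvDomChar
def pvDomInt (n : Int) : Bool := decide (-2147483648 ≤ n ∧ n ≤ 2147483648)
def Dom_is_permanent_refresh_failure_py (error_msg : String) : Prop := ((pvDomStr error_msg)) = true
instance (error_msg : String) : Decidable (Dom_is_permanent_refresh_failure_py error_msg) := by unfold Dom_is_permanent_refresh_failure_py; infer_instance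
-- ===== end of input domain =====

-- B replaces A's six-iteration substring loop by one precompiled regex alternation
-- searched left-to-right over the lowered message (idiomatic; same exact Boolean result).


-- ===== PORT A =====
-- A's pattern list, verbatim
def pvAPatterns : List String :=
  ["400 Bad Request", "invalid_grant", "refresh_token_expired",
   "invalid_refresh_token", "unauthorized_client", "access_denied"]

-- A: lower the message once, then the for-loop with early return True = List.any,
-- each iteration lowering the pattern and testing 'pattern in error_msg_lower'.
def is_permanent_refresh_failure_py (error_msg : String) : Bool :=
  let error_msg_lower := PySem.Str.lower error_msg
  pvAPatterns.any (fun pattern => PySem.Str.isIn (PySem.Str.lower pattern) error_msg_lower)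

-- ===== PORT B =====
-- B's regex: the alternation of the six lowercase literal patterns (the alternatives, as char lists).
def pvRxAlternatives : List (List Char) :=
  ["400 bad request".toList, "invalid_grant".toList, "refresh_token_expired".toList,
   "invalid_refresh_token".toList, "unauthorized_client".toList, "access_denied".toList]

-- B: bool(_PERMANENT_RX.search(error_msg.lower())). re.search of an alternation of
-- string literals is ported exactly as its semantics: scan the start positions
-- 0..len(m) left to right and test whether some alternative matches (is a prefix) there.
def is_permanent_refresh_failure_py_alt (error_msg : String) : Bool :=
  let m := (PySem.Str.lower error_msg).toList
  (List.range (m.length + 1)).any (fun i =>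
    pvRxAlternatives.any (fun p => p.isPrefixOf (m.drop i)))

-- ===== PRECONDITION & SPEC =====
def Spec_is_permanent_refresh_failure_py (error_msg : String) (out : Bool) : Prop := out = is_permanent_refresh_failure_py_alt error_msg
instance (error_msg : String) (out : Bool) : Decidable (Spec_is_permanent_refresh_failure_py error_msg out) := by unfold Spec_is_permanent_refresh_failure_py; infer_instance

-- ===== CLAIM (what is proved, stated in full; the proofs are below) =====
def Claim_equal_is_permanent_refresh_failure_py : Prop := ∀ (error_msg : String), Dom_is_permanent_refresh_failure_py error_msg → Spec_is_permanent_refresh_failure_py error_msg (is_permanent_refresh_failure_py error_msg)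

-- ===== LEMMAS AND PROOFS =====

-- A's patterns, lowered, are exactly B's regex alternatives.
theorem pvPatterns_lower_eq :
    pvAPatterns.map (fun p => (PySem.Str.lower p).toList) = pvRxAlternatives := by decide

-- 'some pattern is a substring of m' = 'at some start position ≤ len m some pattern is a prefix'.
theorem pvAny_isIn_eq_scan (pats : List (List Char)) (m : List Char) :
    pats.any (fun p => PySem.Chars.isIn p m) =
    (List.range (m.length + 1)).any (fun i => pats.any (fun p => p.isPrefixOf (m.drop i))) := by
  rw [Bool.eq_iff_iff]
  simp only [List.any_eq_true, List.mem_range]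
  constructor
  · rintro ⟨p, hp, hin⟩
    obtain ⟨j, hj⟩ := (PySem.Chars.exists_prefix_drop_iff_isIn p m).mpr hin
    by_cases h : j ≤ m.length
    · exact ⟨j, by omega, p, hp, List.isPrefixOf_iff_prefix.mpr hj⟩
    · have hnil : m.drop j = [] := List.drop_eq_nil_of_le (by omega)
      have hpnil : p = [] := List.prefix_nil.mp (hnil ▸ hj)
      exact ⟨m.length, by omega, p, hp,
        List.isPrefixOf_iff_prefix.mpr (by simp [hpnil])⟩
  · rintro ⟨i, _, p, hp, hpre⟩
    exact ⟨p, hp, (PySem.Chars.exists_prefix_drop_iff_isIn p m).mp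
      ⟨i, List.isPrefixOf_iff_prefix.mp hpre⟩⟩

-- ===== VERDICT (by name: the statement is the Claim_ definition above) =====
theorem is_permanent_refresh_failure_py_spec : Claim_equal_is_permanent_refresh_failure_py := by
  intro error_msg _
  unfold Spec_is_permanent_refresh_failure_py
  unfold is_permanent_refresh_failure_py is_permanent_refresh_failure_py_alt
  rw [← pvPatterns_lower_eq, ← pvAny_isIn_eq_scan]
  simp [PySem.Str.isIn_eq, List.any_map, Function.comp_def]
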